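-- pv_equiv track=rewrite | github.com/f3rnando3669/latinDict | Computer-Science-Research-Summer-master/MachineLearningSummer/deprecated/utilities.py | remove_line_spacing
-- ===== SOURCE A (Python) =====
-- def remove_line_spacing(text: str) -> str:
--
--     rv = ""
--     window_length = 0
--
--     for i in range(len(text)):
--         if text[i] != '\n':
--             if window_length > 0:
--                 rv += "\n"
--                 window_length = 0
--             rv += text[i]
--         else:
--             window_length += 1
--
--     return rv
-- ===== SOURCE B (Python) =====
-- def remove_line_spacing(text: str) -> str:
--     parts = [p for p in text.split('\n') if p]
--     if not parts:
--         return ""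
--     lead = "\n" if text[0] == '\n' else ""
--     return lead + "\n".join(parts)
-- ===== Notes on version B (the rewrite author's own statement) =====
-- stated objective: idiomatic
-- what changed: Replaced A's character-by-character loop with a pending-newline counter by the idiomatic split-on-newline / filter-out-empty-pieces / join pipeline, re-prepending the single collapsed leading newline that A keeps.
import Mathlib
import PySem

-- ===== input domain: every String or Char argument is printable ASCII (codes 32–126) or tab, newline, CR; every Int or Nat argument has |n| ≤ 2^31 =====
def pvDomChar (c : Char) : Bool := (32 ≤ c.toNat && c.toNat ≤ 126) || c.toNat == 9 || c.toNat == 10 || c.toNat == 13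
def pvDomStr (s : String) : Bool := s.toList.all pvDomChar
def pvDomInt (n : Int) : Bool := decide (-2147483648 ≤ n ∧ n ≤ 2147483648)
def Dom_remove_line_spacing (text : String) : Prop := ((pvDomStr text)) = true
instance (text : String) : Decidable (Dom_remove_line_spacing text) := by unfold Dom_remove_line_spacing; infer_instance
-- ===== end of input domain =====

-- B replaces A's char-by-char pending-newline state machine by split('\n') / filter / join with the leading newline restored (idiomatic; return value only).


-- ===== PORT A =====
-- one loop step of A: branches in A's order, state (rv, window_length)
def rlsStepA (s : List Char × Int) (c : Char) : List Char × Int :=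
  if c ≠ '\n' then
    let rv := if s.2 > 0 then s.1 ++ ['\n'] else s.1
    (rv ++ [c], 0)
  else
    (s.1, s.2 + 1)

def remove_line_spacing (text : String) : String :=
  String.ofList (text.toList.foldl rlsStepA ([], 0)).1

-- ===== PORT B =====
def remove_line_spacing_alt (text : String) : String :=
  let parts := (PySem.Chars.splitOn text.toList ['\n']).filter (fun p => !p.isEmpty)
  if parts = [] then ""
  else
    let lead : List Char := if PySem.List.pyGet? text.toList 0 = some '\n' then ['\n'] else []
    String.ofList (lead ++ PySem.Chars.join ['\n'] parts)

-- ===== PRECONDITION & SPEC =====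
def Spec_remove_line_spacing (text : String) (out : String) : Prop := out = remove_line_spacing_alt text
instance (text : String) (out : String) : Decidable (Spec_remove_line_spacing text out) := by unfold Spec_remove_line_spacing; infer_instance

-- ===== CLAIM (what is proved, stated in full; the proofs are below) =====
def Claim_equal_remove_line_spacing : Prop := ∀ (text : String), Dom_remove_line_spacing text → Spec_remove_line_spacing text (remove_line_spacing text)

-- ===== LEMMAS AND PROOFS =====

-- canonical form of A's loop: p records whether a newline run is pending
def rlsG (p : Bool) : List Char → List Char
  | [] => []
  | c :: cs => if c = '\n' then rlsG true cs else (if p then ['\n'] else []) ++ c :: rlsG false cs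

theorem rlsFold_eq_g (cs : List Char) : ∀ (rv : List Char) (w : Int), 0 ≤ w →
    (cs.foldl rlsStepA (rv, w)).1 = rv ++ rlsG (decide (w > 0)) cs := by
  induction cs with
  | nil => intro rv w _; simp [rlsG]
  | cons c cs ih =>
    intro rv w hw
    by_cases hc : c = '\n'
    · subst hc
      simp only [List.foldl_cons, rlsStepA]
      rw [if_neg (by simp)]
      rw [ih rv (w + 1) (by omega)]
      have hd : (decide (w + 1 > 0)) = true := by rw [decide_eq_true_eq]; omega
      rw [hd]
      simp [rlsG]
    · simp only [List.foldl_cons, rlsStepA]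
      rw [if_pos hc, ih _ _ (by omega)]
      by_cases hw0 : w > 0
      · simp [rlsG, hc, hw0]
      · simp [rlsG, hc, hw0]

-- simple split on '\n' (B's text.split('\n'))
def splitNl : List Char → List (List Char)
  | [] => [[]]
  | c :: cs => if c = '\n' then [] :: splitNl cs else (splitNl cs).modifyHead (c :: ·)

theorem splitNl_ne_nil (cs : List Char) : splitNl cs ≠ [] := by
  cases cs with
  | nil => simp [splitNl]
  | cons c cs =>
    simp only [splitNl]
    split
    · simp
    · cases h : splitNl cs with
      | nil => exact absurd h (splitNl_ne_nil cs)
      | cons a t => simp [List.modifyHead]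

theorem splitOn_go_eq (cs : List Char) : ∀ (fuel : Nat) (cur : List Char) (acc : List (List Char)),
    cs.length < fuel →
    PySem.Chars.splitOn.go ['\n'] fuel cs cur acc
      = acc.reverse ++ (splitNl cs).modifyHead (cur.reverse ++ ·) := by
  induction cs with
  | nil =>
    intro fuel cur acc h
    match fuel with
    | fuel + 1 => simp [PySem.Chars.splitOn.go, splitNl]
  | cons c cs ih =>
    intro fuel cur acc h
    match fuel with
    | fuel + 1 =>
      by_cases hc : c = '\n'
      · subst hc
        rw [show PySem.Chars.splitOn.go ['\n'] (fuel+1) ('\n'::cs) cur acc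
              = PySem.Chars.splitOn.go ['\n'] fuel cs [] (cur.reverse :: acc) by
            simp [PySem.Chars.splitOn.go, List.isPrefixOf]]
        rw [ih fuel [] (cur.reverse :: acc) (by simpa using h)]
        have : (splitNl cs).modifyHead (List.nil.reverse ++ ·) = splitNl cs := by
          cases hs : splitNl cs with
          | nil => rfl
          | cons a t => simp [List.modifyHead]
        rw [this]
        simp [splitNl]
      · have step : PySem.Chars.splitOn.go ['\n'] (fuel+1) (c::cs) cur acc
            = PySem.Chars.splitOn.go ['\n'] fuel cs (c :: cur) acc := by
          simp [PySem.Chars.splitOn.go, List.isPrefixOf]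
          intro h'
          exact absurd h'.symm hc
        rw [step]
        rw [ih fuel (c :: cur) acc (by simpa using h)]
        simp only [splitNl, if_neg hc]
        cases hs : splitNl cs with
        | nil => exact absurd hs (splitNl_ne_nil cs)
        | cons a t => simp [List.modifyHead]

theorem splitOn_eq_splitNl (cs : List Char) : PySem.Chars.splitOn cs ['\n'] = splitNl cs := by
  rw [PySem.Chars.splitOn, splitOn_go_eq cs (cs.length + 1) [] [] (by omega)]
  cases hs : splitNl cs with
  | nil => exact absurd hs (splitNl_ne_nil cs)
  | cons a t => simp [List.modifyHead]

def rlsF (cs : List Char) : List (List Char) := (splitNl cs).filter (fun p => !p.isEmpty)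

theorem ic_cons (s x : List Char) (xs : List (List Char)) (h : xs ≠ []) :
    List.intercalate s (x :: xs) = x ++ s ++ List.intercalate s xs := by
  cases xs with
  | nil => exact absurd rfl h
  | cons y ys => simp [List.intercalate, List.intersperse]

-- the two canonical forms, proved together
theorem g_eq_join (cs : List Char) :
    (rlsG true cs = (if rlsF cs = [] then [] else ['\n']) ++ List.intercalate ['\n'] (rlsF cs))
    ∧ (rlsG false cs = (if cs.head? = some '\n' ∧ rlsF cs ≠ [] then ['\n'] else [])
          ++ List.intercalate ['\n'] (rlsF cs)) := by
  induction cs with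
  | nil => simp [rlsG, rlsF, splitNl, List.intercalate]
  | cons c cs ih =>
    by_cases hc : c = '\n'
    · subst hc
      have hF : rlsF ('\n' :: cs) = rlsF cs := by simp [rlsF, splitNl]
      constructor
      · simp only [rlsG, hF]; exact ih.1
      · simp only [rlsG, hF]
        rw [ih.1]
        by_cases h : rlsF cs = [] <;> simp [h]
    · -- c ≠ '\n' : head part of splitNl cs grows by c
      obtain ⟨a, t, hs⟩ : ∃ a t, splitNl cs = a :: t := by
        cases hs : splitNl cs with
        | nil => exact absurd hs (splitNl_ne_nil cs)
        | cons a t => exact ⟨a, t, rfl⟩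
      have hsplit : splitNl (c :: cs) = (c :: a) :: t := by
        simp [splitNl, if_neg hc, hs, List.modifyHead]
      have hFc : rlsF (c :: cs) = (c :: a) :: t.filter (fun p => !p.isEmpty) := by
        simp [rlsF, hsplit]
      have hFcs : rlsF cs = (if a.isEmpty then [] else [a]) ++ t.filter (fun p => !p.isEmpty) := by
        by_cases ha : a.isEmpty <;> simp [rlsF, hs, ha]
      have key : c :: rlsG false cs = List.intercalate ['\n'] (rlsF (c :: cs)) := by
        rw [ih.2, hFc]
        by_cases ha : a.isEmpty
        · -- a = [] : cs is empty or starts with '\n'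
          have ha' : a = [] := by simpa [List.isEmpty_iff] using ha
          subst ha'
          have hhead : cs = [] ∨ cs.head? = some '\n' := by
            cases cs with
            | nil => exact Or.inl rfl
            | cons d ds =>
              right
              by_cases hd : d = '\n'
              · simp [hd]
              · exfalso
                have := hs
                simp only [splitNl, if_neg hd] at this
                cases hds : splitNl ds with
                | nil => exact absurd hds (splitNl_ne_nil ds)
                | cons b u => rw [hds] at this; simp [List.modifyHead] at this
          have hF' : rlsF cs = t.filter (fun p => !p.isEmpty) := by simp [hFcs, ha]
          rcases hhead with hnil | hnl
          · subst hnil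
            simp only [splitNl] at hs
            have ht : t = [] := by simpa using hs.symm
            simp [hF', ht, List.intercalate]
          · by_cases hT : t.filter (fun p => !p.isEmpty) = []
            · simp [hnl, hF', hT, List.intercalate]
            · rw [ic_cons _ _ _ hT]
              simp [hnl, hF', hT]
        · -- a nonempty : cs starts with a non-newline char, head? ≠ '\n'
          have ha' : a ≠ [] := by simpa [List.isEmpty_iff] using ha
          have hhead : ¬ (cs.head? = some '\n' ∧ rlsF cs ≠ []) := by
            rintro ⟨hnl, -⟩
            cases cs with
            | nil => simp at hnl
            | cons d ds =>
              have hd : d = '\n' := by simpa using hnl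
              subst hd
              simp only [splitNl] at hs
              injection hs with h1 h2
              exact ha' h1.symm
          have hF' : rlsF cs = a :: t.filter (fun p => !p.isEmpty) := by simp [hFcs, ha]
          rw [if_neg hhead, hF']
          by_cases hT : t.filter (fun p => !p.isEmpty) = []
          · simp [hT, List.intercalate]
          · rw [ic_cons _ _ _ hT, ic_cons _ _ _ hT]
            simp
      constructor
      · simp only [rlsG, if_neg hc]
        rw [key, hFc]
        simp
      · simp only [rlsG, if_neg hc]
        rw [key]
        simp [hc, hFc]

-- pyGet? at 0 is head?
theorem pyGet?_zero (cs : List Char) : PySem.List.pyGet? cs 0 = cs.head? := by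
  cases cs <;> simp [PySem.List.pyGet?, PySem.List.pyIdx?]

-- ===== VERDICT (by name: the statement is the Claim_ definition above) =====
theorem remove_line_spacing_spec : Claim_equal_remove_line_spacing := by
  intro text _
  unfold Spec_remove_line_spacing remove_line_spacing remove_line_spacing_alt
  rw [rlsFold_eq_g _ _ _ (le_refl 0), splitOn_eq_splitNl, pyGet?_zero]
  simp only [List.nil_append, show (decide ((0:Int) > 0)) = false from rfl]
  have h := (g_eq_join text.toList).2
  by_cases hF : (splitNl text.toList).filter (fun p => !p.isEmpty) = []
  · rw [if_pos hF]
    have hz : rlsG false text.toList = [] := by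
      rw [h]; simp [rlsF, hF, List.intercalate]
    rw [hz]
  · rw [if_neg hF]
    have hFr : rlsF text.toList ≠ [] := by simpa [rlsF] using hF
    rw [h]
    by_cases hd : text.toList.head? = some '\n'
    · rw [if_pos ⟨hd, hFr⟩, if_pos hd]
      rfl
    · rw [if_neg (fun hx => hd hx.1), if_neg hd]
      rfl
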